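-- pv_equiv track=rewrite | github.com/KingCrusher275/AdventOfCode-2023 | AOC7P1.py | compare
-- ===== SOURCE A (Python) =====
-- vals = {"2": 2, "3": 3, "4": 4, "5": 5, "6": 6, "7": 7, "8": 8,
--         "9": 9, "T": 10, "J": 11, "Q": 12, "K": 13, "A": 14}
--
-- def handType(hand):
--     sortHand = sorted(hand)
--     counts = []
--     cnt = 1
--     for i in range(len(hand) - 1):
--         if (sortHand[i] == sortHand[i+1]):
--             cnt += 1
--         else:
--             counts.append(cnt)
--             cnt = 1
--     counts.append(cnt)
--
--     counts = sorted(counts)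
--     if (counts[-1] == 5):
--         return 7
--     elif (counts[-1] == 4):
--         return 6
--     elif (counts[-1] == 3 and counts[-2] == 2):
--         return 5
--     elif (counts[-1] == 3):
--         return 4
--     elif (counts[-1] == 2 and counts[-2] == 2):
--         return 3
--     elif (counts[-1] == 2):
--         return 2
--     else:
--         return 1
--
-- def compare(item1, item2):
--     h1 = handType(item1[0])
--     h2 = handType(item2[0])
--     if (h1 < h2):
--         return -1
--     elif (h2 < h1):
--         return 1
--     else:
--         for i in range(len(item1[0])):
--             if (vals[item1[0][i]] < vals[item2[0][i]]):
--                 return -1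
--             elif (vals[item1[0][i]] > vals[item2[0][i]]):
--                 return 1
--         return 1
-- ===== SOURCE B (Python) =====
-- vals = {"2": 2, "3": 3, "4": 4, "5": 5, "6": 6, "7": 7, "8": 8,
--         "9": 9, "T": 10, "J": 11, "Q": 12, "K": 13, "A": 14}
--
-- def handType(hand):
--     # frequency table instead of sorting the hand and scanning for runs
--     freq = {}
--     for c in hand:
--         freq[c] = freq.get(c, 0) + 1
--     counts = sorted(freq.values())
--     m1 = counts[-1] if counts else 1          # largest group
--     m2 = counts[-2] if len(counts) > 1 else 0  # second-largest group
--     base = {5: 7, 4: 6, 3: 4, 2: 2}.get(m1, 1)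
--     return base + (1 if 2 <= m1 <= 3 and m2 == 2 else 0)  # full house / two pair bonus
--
-- def compare(item1, item2):
--     h1 = handType(item1[0])
--     h2 = handType(item2[0])
--     if h1 != h2:
--         return -1 if h1 < h2 else 1
--     for c1, c2 in zip(item1[0], item2[0]):
--         v1, v2 = vals[c1], vals[c2]
--         if v1 != v2:
--             return -1 if v1 < v2 else 1
--     return 1  # the original comparator reports 1 on a full tie; kept
-- ===== Notes on version B (the rewrite author's own statement) =====
-- stated objective: idiomatic
-- what changed: handType classifies via a frequency dict whose sorted count-multiset feeds a base-table-plus-pair-bonus formula, replacing the sort/run-length scan and the six-way if-chain; compare's index loop becomes a zip over the two hands; Pre_ excludes exactly the inputs where A raises (IndexError on a one-group hand of size 2 or 3, and KeyError/IndexError in the tie-break loop).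
import Mathlib
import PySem

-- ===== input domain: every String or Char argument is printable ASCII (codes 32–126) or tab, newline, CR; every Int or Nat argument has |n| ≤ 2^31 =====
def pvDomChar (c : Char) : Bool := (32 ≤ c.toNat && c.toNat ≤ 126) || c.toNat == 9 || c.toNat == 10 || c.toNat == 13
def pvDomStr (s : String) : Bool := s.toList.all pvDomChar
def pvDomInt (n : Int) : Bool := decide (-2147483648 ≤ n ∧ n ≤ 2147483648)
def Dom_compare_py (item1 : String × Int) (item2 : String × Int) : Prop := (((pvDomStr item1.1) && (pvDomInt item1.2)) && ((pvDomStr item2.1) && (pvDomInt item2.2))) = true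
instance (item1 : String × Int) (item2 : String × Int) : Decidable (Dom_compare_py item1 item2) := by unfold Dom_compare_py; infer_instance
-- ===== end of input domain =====

-- B replaces A's sort + run-length scan + six-way if-chain by a frequency-dict whose sorted
-- count multiset feeds a base-table-plus-pair-bonus formula, and A's index loop by a zip walk
-- (objective: idiomatic; equal return values on every input where the Python A returns).

-- ===== PORT A =====
def pvValsD : PySem.Dict Char Int :=
  PySem.Dict.ofList [('2',2),('3',3),('4',4),('5',5),('6',6),('7',7),('8',8),('9',9),
                     ('T',10),('J',11),('Q',12),('K',13),('A',14)]

def pvHandTypeA (hand : List Char) : Int :=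
  let sortHand := PySem.List.sorted hand (fun c => c) false
  let st := (PySem.List.pyRange 0 (PySem.List.len hand - 1) 1).foldl
      (fun (st : List Int × Int) i =>
        if PySem.List.pyGetD sortHand i ' ' = PySem.List.pyGetD sortHand (i+1) ' '
        then (st.1, st.2 + 1) else (st.1 ++ [st.2], 1)) ([], 1)
  let counts := PySem.List.sorted (st.1 ++ [st.2]) (fun x => x) false
  if PySem.List.pyGetD counts (-1) 0 = 5 then 7
  else if PySem.List.pyGetD counts (-1) 0 = 4 then 6
  else if PySem.List.pyGetD counts (-1) 0 = 3 then
    match PySem.List.pyGet? counts (-2) with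
    | some y => if y = 2 then 5 else 4
    | none => 0  -- Python raises IndexError here; excluded by Pre_
  else if PySem.List.pyGetD counts (-1) 0 = 2 then
    match PySem.List.pyGet? counts (-2) with
    | some y => if y = 2 then 3 else 2
    | none => 0  -- Python raises IndexError here; excluded by Pre_
  else 1

def pvTieA (s1 s2 : List Char) : List Int → Int
  | [] => 1
  | i :: rest =>
    match PySem.List.pyGet? s1 i with
    | none => 0  -- unreachable: i ranges over range(len(item1[0]))
    | some c1 =>
      match PySem.Dict.get? pvValsD c1 with
      | none => 0  -- Python raises KeyError here; excluded by Pre_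
      | some v1 =>
        match PySem.List.pyGet? s2 i with
        | none => 0  -- Python raises IndexError here; excluded by Pre_
        | some c2 =>
          match PySem.Dict.get? pvValsD c2 with
          | none => 0  -- Python raises KeyError here; excluded by Pre_
          | some v2 =>
            if v1 < v2 then -1 else if v2 < v1 then 1 else pvTieA s1 s2 rest

def compare_py (item1 : String × Int) (item2 : String × Int) : Int :=
  let h1 := pvHandTypeA item1.1.toList
  let h2 := pvHandTypeA item2.1.toList
  if h1 < h2 then -1
  else if h2 < h1 then 1
  else pvTieA item1.1.toList item2.1.toList
         (PySem.List.pyRange 0 (PySem.List.len item1.1.toList) 1)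

-- ===== PORT B =====
def pvHandTypeB (hand : List Char) : Int :=
  let freq := hand.foldl (fun d c => d.insert c (d.getD c 0 + 1)) PySem.Dict.empty
  let counts := PySem.List.sorted (PySem.Dict.values freq) (fun x => x) false
  let m1 := if counts ≠ [] then PySem.List.pyGetD counts (-1) 0 else 1
  let m2 := if 1 < counts.length then PySem.List.pyGetD counts (-2) 0 else 0
  let base := PySem.Dict.getD (PySem.Dict.ofList [((5:Int),(7:Int)),(4,6),(3,4),(2,2)]) m1 1
  base + (if 2 ≤ m1 ∧ m1 ≤ 3 ∧ m2 = 2 then 1 else 0)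

def pvTieB : List Char → List Char → Int
  | c1 :: t1, c2 :: t2 =>
    (match PySem.Dict.get? pvValsD c1 with
     | none => 0  -- Python raises KeyError here; excluded by Pre_
     | some v1 =>
       match PySem.Dict.get? pvValsD c2 with
       | none => 0  -- Python raises KeyError here; excluded by Pre_
       | some v2 =>
         if v1 ≠ v2 then (if v1 < v2 then -1 else 1) else pvTieB t1 t2)
  | _, _ => 1  -- zip exhausted: full tie reported as 1, as in A

def compare_py_alt (item1 : String × Int) (item2 : String × Int) : Int :=
  let h1 := pvHandTypeB item1.1.toList
  let h2 := pvHandTypeB item2.1.toList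
  if h1 ≠ h2 then (if h1 < h2 then -1 else 1)
  else pvTieB item1.1.toList item2.1.toList

-- ===== PRECONDITION & SPEC =====
def pvCardList : List Char := ['2','3','4','5','6','7','8','9','T','J','Q','K','A']
def pvCardOK (c : Char) : Bool := pvCardList.contains c
-- a hand of exactly one repeated card of length 2 or 3 makes handType read counts[-2] of a
-- one-element list (IndexError)
def pvShape (l : List Char) : Bool :=
  match l with
  | [a,b] => a == b
  | [a,b,c] => a == b && b == c
  | _ => false
-- spec-level hand type: classification of the sorted multiset of per-card multiplicities
def pvCountsSpec (l : List Char) : List Int :=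
  PySem.List.sorted ((PySem.List.dedup l).map (fun c => (l.count c : Int))) (fun x => x) false
def pvTypeSpec (l : List Char) : Int :=
  let counts := pvCountsSpec l
  let m1 := if counts ≠ [] then PySem.List.pyGetD counts (-1) 0 else 1
  let m2 := if 1 < counts.length then PySem.List.pyGetD counts (-2) 0 else 0
  let base := PySem.Dict.getD (PySem.Dict.ofList [((5:Int),(7:Int)),(4,6),(3,4),(2,2)]) m1 1
  base + (if 2 ≤ m1 ∧ m1 ≤ 3 ∧ m2 = 2 then 1 else 0)
-- the tie-break loop from position k on runs to a return: either some reachable position has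
-- two distinct card characters, or the whole of hand1 is scanned without IndexError/KeyError
def pvSafeFrom (k : Nat) (s1 s2 : List Char) : Prop :=
  (∃ i < min s1.length s2.length, k ≤ i ∧
      (∀ j ≤ i, k ≤ j → pvCardOK (s1.getD j ' ') = true ∧ pvCardOK (s2.getD j ' ') = true) ∧
      s1.getD i ' ' ≠ s2.getD i ' ')
  ∨ (s1.length ≤ s2.length ∧
      ∀ i < s1.length, k ≤ i → pvCardOK (s1.getD i ' ') = true ∧ pvCardOK (s2.getD i ' ') = true)

-- Pre_ excludes exactly the inputs where A raises: an IndexError in handType on a one-group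
-- hand of length 2 or 3, and a KeyError/IndexError in the tie-break loop reached on equal types.
def Pre_compare_py (item1 : String × Int) (item2 : String × Int) : Prop :=
  pvShape item1.1.toList = false ∧ pvShape item2.1.toList = false ∧
  (pvTypeSpec item1.1.toList = pvTypeSpec item2.1.toList →
    pvSafeFrom 0 item1.1.toList item2.1.toList)
instance (item1 : String × Int) (item2 : String × Int) : Decidable (Pre_compare_py item1 item2) := by
  unfold Pre_compare_py pvSafeFrom; infer_instance

def pvWitness_compare_py : (String × Int) × (String × Int) := (("32T3K", 765), ("T55J5", 684))

def Spec_compare_py (item1 : String × Int) (item2 : String × Int) (out : Int) : Prop :=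
  out = compare_py_alt item1 item2
instance (item1 : String × Int) (item2 : String × Int) (out : Int) : Decidable (Spec_compare_py item1 item2 out) := by
  unfold Spec_compare_py; infer_instance

-- ===== CLAIM (what is proved, stated in full; the proofs are below) =====
def Claim_equal_compare_py : Prop := ∀ (item1 : String × Int) (item2 : String × Int), Dom_compare_py item1 item2 → Pre_compare_py item1 item2 → Spec_compare_py item1 item2 (compare_py item1 item2)

-- ===== LEMMAS AND PROOFS =====

-- run-length list of A's scan, structurally
def pvRle : Char → Int → List Char → List Int
  | _, k, [] => [k]
  | a, k, b :: t => if a = b then pvRle b (k+1) t else k :: pvRle b 1 t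

-- first-occurrence dedup, cons-shaped (proof gadget)
def pvDedup : List Char → List Char
  | [] => []
  | a :: t => a :: (pvDedup t).filter (fun b => b ≠ a)

theorem pv_mem_pvDedup (c : Char) (l : List Char) : c ∈ pvDedup l ↔ c ∈ l := by
  induction l with
  | nil => simp [pvDedup]
  | cons a t ih =>
    simp only [pvDedup, List.mem_cons, List.mem_filter]
    constructor
    · rintro (rfl | ⟨h, _⟩); · exact .inl rfl
      exact .inr (ih.mp h)
    · rintro (rfl | h); · exact .inl rfl
      by_cases hca : c = a
      · exact .inl hca
      · exact .inr ⟨ih.mpr h, by simpa using hca⟩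

theorem pv_nodup_pvDedup (l : List Char) : (pvDedup l).Nodup := by
  induction l with
  | nil => simp [pvDedup]
  | cons a t ih =>
    simp only [pvDedup, List.nodup_cons]
    refine ⟨fun hmem => ?_, ih.filter _⟩
    have := (List.mem_filter.mp hmem).2
    simp at this

theorem pvZipFold (t : List Char) : ∀ (a : Char) (acc : List Int) (k : Int),
    (((a :: t).zip t).foldl
      (fun (st : List Int × Int) p => if p.1 = p.2 then (st.1, st.2 + 1) else (st.1 ++ [st.2], 1))
      (acc, k)).1 ++
    [(((a :: t).zip t).foldl
      (fun (st : List Int × Int) p => if p.1 = p.2 then (st.1, st.2 + 1) else (st.1 ++ [st.2], 1))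
      (acc, k)).2]
    = acc ++ pvRle a k t := by
  induction t with
  | nil => simp [pvRle]
  | cons b t ih =>
    intro a acc k
    by_cases hab : a = b
    · simp [List.zip_cons_cons, hab, pvRle, ih]
    · simp [List.zip_cons_cons, hab, pvRle, ih, List.append_assoc]

theorem pvRleEq (t : List Char) : ∀ (a : Char) (k : Int), (a :: t).Pairwise (· ≤ ·) →
    pvRle a k t = (k + (t.count a : Int)) ::
      ((pvDedup t).filter (fun b => b ≠ a)).map (fun c => (t.count c : Int)) := by
  induction t with
  | nil => intro a k _; simp [pvRle, pvDedup]
  | cons b t ih =>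
    intro a k h
    have hpair : (b :: t).Pairwise (· ≤ ·) := h.of_cons
    by_cases hab : a = b
    · subst hab
      rw [pvRle, if_pos rfl, ih a (k+1) hpair]
      have hd : (pvDedup (a :: t)).filter (fun b => b ≠ a)
          = (pvDedup t).filter (fun b => b ≠ a) := by
        simp [pvDedup, List.filter_filter]
      rw [hd]
      have hcnt : ((a :: t).count a : Int) = (t.count a : Int) + 1 := by
        rw [List.count_cons_self]; push_cast; ring
      have hmap : ((pvDedup t).filter (fun b => b ≠ a)).map (fun c => ((a :: t).count c : Int))
          = ((pvDedup t).filter (fun b => b ≠ a)).map (fun c => (t.count c : Int)) := by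
        apply List.map_congr_left
        intro c hc
        have hne : c ≠ a := by simpa using (List.mem_filter.mp hc).2
        simp [Ne.symm hne]
      rw [hcnt, hmap]
      congr 1
      ring
    · have hle : ∀ x ∈ b :: t, a ≤ x := fun x hx => List.rel_of_pairwise_cons h hx
      have hbt : ∀ x ∈ t, b ≤ x := fun x hx => List.rel_of_pairwise_cons hpair hx
      have hanot : a ∉ t := by
        intro hmem
        have h1 : a ≤ b := hle b (List.mem_cons_self)
        have h2 : b ≤ a := hbt a hmem
        exact hab (le_antisymm h1 h2)
      rw [pvRle, if_neg hab, ih b 1 hpair]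
      have hcnt0 : ((b :: t).count a : Int) = 0 := by
        rw [List.count_eq_zero.mpr (by simp [hab, hanot])]; rfl
      have hd : (pvDedup (b :: t)).filter (fun x => x ≠ a)
          = b :: (pvDedup t).filter (fun x => x ≠ b) := by
        rw [pvDedup]
        rw [List.filter_cons_of_pos (by simpa using Ne.symm hab)]
        congr 1
        rw [List.filter_filter]
        apply List.filter_congr
        intro x hx
        have hxt : x ∈ t := (pv_mem_pvDedup x t).mp hx
        have hxa : x ≠ a := fun hxa => hanot (hxa ▸ hxt)
        simp [hxa]
      rw [hcnt0, hd]
      simp only [List.map_cons]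
      have hcb : ((b :: t).count b : Int) = 1 + (t.count b : Int) := by
        rw [List.count_cons_self]; push_cast; ring
      have hmap : ((pvDedup t).filter (fun x => x ≠ b)).map (fun c => ((b :: t).count c : Int))
          = ((pvDedup t).filter (fun x => x ≠ b)).map (fun c => (t.count c : Int)) := by
        apply List.map_congr_left
        intro c hc
        have hne : c ≠ b := by simpa using (List.mem_filter.mp hc).2
        simp [Ne.symm hne]
      rw [hcb, hmap]
      simp

theorem pvScanEq (s : List Char) (a' : Char) (t' : List Char)
    (hst : PySem.List.sorted s (fun c => c) false = a' :: t') :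
    ((PySem.List.pyRange 0 (PySem.List.len s - 1) 1).foldl
        (fun (st : List Int × Int) i =>
          if PySem.List.pyGetD (PySem.List.sorted s (fun c => c) false) i ' '
             = PySem.List.pyGetD (PySem.List.sorted s (fun c => c) false) (i+1) ' '
          then (st.1, st.2 + 1) else (st.1 ++ [st.2], 1)) ([], 1)).1
      ++ [((PySem.List.pyRange 0 (PySem.List.len s - 1) 1).foldl
        (fun (st : List Int × Int) i =>
          if PySem.List.pyGetD (PySem.List.sorted s (fun c => c) false) i ' '
             = PySem.List.pyGetD (PySem.List.sorted s (fun c => c) false) (i+1) ' '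
          then (st.1, st.2 + 1) else (st.1 ++ [st.2], 1)) ([], 1)).2]
      = pvRle a' 1 t' := by
  have hlen : s.length = t'.length + 1 := by
    have h := PySem.List.length_sorted s (fun c => c) false
    rw [hst] at h; simpa using h.symm
  rw [hst]
  have hm : PySem.List.len s - 1 = (((a' :: t').zip t').length : Int) := by
    simp [PySem.List.len_eq, List.length_zip, hlen]
  rw [hm]
  have hcongr : ∀ (acc : List Int × Int), ∀ i ∈ PySem.List.pyRange 0 (((a' :: t').zip t').length : Int) 1,
      (fun (st : List Int × Int) i =>
          if PySem.List.pyGetD (a' :: t') i ' ' = PySem.List.pyGetD (a' :: t') (i+1) ' '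
          then (st.1, st.2 + 1) else (st.1 ++ [st.2], 1)) acc i
      = (fun (st : List Int × Int) (p : Char × Char) =>
          if p.1 = p.2 then (st.1, st.2 + 1) else (st.1 ++ [st.2], 1)) acc
          (PySem.List.pyGetD ((a' :: t').zip t') i (' ', ' ')) := by
    intro acc i hi
    obtain ⟨h0, h1⟩ := PySem.List.mem_pyRange_one.mp hi
    have hzl : ((a' :: t').zip t').length = t'.length := by simp [List.length_zip]
    rw [hzl] at h1
    have hiN : i.toNat < t'.length := by omega
    have hb1 : i < (((a' :: t').length : Nat) : Int) := by
      simp only [List.length_cons]; push_cast; omega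
    have hb2 : i + 1 < (((a' :: t').length : Nat) : Int) := by
      simp only [List.length_cons]; push_cast; omega
    have hb3 : i < ((((a' :: t').zip t').length : Nat) : Int) := by rw [hzl]; omega
    have e1 : PySem.List.pyGetD (a' :: t') i ' ' = (a' :: t')[i.toNat] :=
      PySem.List.pyGetD_eq_getElem (a' :: t') ' ' h0 hb1
    have e2 : PySem.List.pyGetD (a' :: t') (i+1) ' ' = (a' :: t')[i.toNat + 1] := by
      have h' : (i+1).toNat = i.toNat + 1 := by omega
      rw [PySem.List.pyGetD_eq_getElem (a' :: t') ' ' (by omega) hb2]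
      simp only [h']
    have e3 : PySem.List.pyGetD ((a' :: t').zip t') i (' ', ' ')
        = ((a' :: t')[i.toNat], t'[i.toNat]) := by
      rw [PySem.List.pyGetD_eq_getElem ((a' :: t').zip t') (' ', ' ') h0 hb3]
      exact List.getElem_zip
    simp only [e1, e2, e3, List.getElem_cons_succ]
  rw [PySem.List.foldl_congr_mem _ _ _ _ hcongr]
  rw [PySem.List.foldl_pyRange_zero_pyGetD' ((a' :: t').zip t') (' ', ' ')
        (fun (st : List Int × Int) (p : Char × Char) =>
          if p.1 = p.2 then (st.1, st.2 + 1) else (st.1 ++ [st.2], 1)) ([], 1)]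
  simpa using pvZipFold t' a' [] 1

theorem pvTable (x : Int) :
    PySem.Dict.getD (PySem.Dict.ofList [((5:Int),(7:Int)),(4,6),(3,4),(2,2)]) x 1
    = if x = 5 then 7 else if x = 4 then 6 else if x = 3 then 4 else if x = 2 then 2 else 1 := by
  have h : PySem.Dict.ofList [((5:Int),(7:Int)),(4,6),(3,4),(2,2)]
      = PySem.Dict.mk [((5:Int),(7:Int)),(4,6),(3,4),(2,2)] := by decide
  rw [PySem.Dict.getD, h]
  rw [PySem.Dict.get?_mk_cons, PySem.Dict.get?_mk_cons, PySem.Dict.get?_mk_cons,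
      PySem.Dict.get?_mk_cons]
  by_cases h5 : x = 5
  · rw [if_pos (show ((5:Int) == x) = true by simp [h5]), if_pos h5]; rfl
  · rw [if_neg (show ¬((5:Int) == x) = true by simp; omega), if_neg h5]
    by_cases h4 : x = 4
    · rw [if_pos (show ((4:Int) == x) = true by simp [h4]), if_pos h4]; rfl
    · rw [if_neg (show ¬((4:Int) == x) = true by simp; omega), if_neg h4]
      by_cases h3 : x = 3
      · rw [if_pos (show ((3:Int) == x) = true by simp [h3]), if_pos h3]; rfl
      · rw [if_neg (show ¬((3:Int) == x) = true by simp; omega), if_neg h3]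
        by_cases h2 : x = 2
        · rw [if_pos (show ((2:Int) == x) = true by simp [h2]), if_pos h2]; rfl
        · rw [if_neg (show ¬((2:Int) == x) = true by simp; omega), if_neg h2]; rfl

theorem pvClassifyEq (s : List Char) (hne : pvCountsSpec s ≠ [])
    (h23 : ∀ x : Int, pvCountsSpec s = [x] → x ≠ 2 ∧ x ≠ 3) :
    (if PySem.List.pyGetD (pvCountsSpec s) (-1) 0 = 5 then (7:Int)
     else if PySem.List.pyGetD (pvCountsSpec s) (-1) 0 = 4 then 6
     else if PySem.List.pyGetD (pvCountsSpec s) (-1) 0 = 3 then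
       match PySem.List.pyGet? (pvCountsSpec s) (-2) with
       | some y => if y = 2 then 5 else 4
       | none => 0
     else if PySem.List.pyGetD (pvCountsSpec s) (-1) 0 = 2 then
       match PySem.List.pyGet? (pvCountsSpec s) (-2) with
       | some y => if y = 2 then 3 else 2
       | none => 0
     else 1)
    = pvTypeSpec s := by
  unfold pvTypeSpec
  simp only []
  generalize hC : pvCountsSpec s = c at hne h23 ⊢
  rcases c with _ | ⟨x, _ | ⟨y, c''⟩⟩
  · exact absurd rfl hne
  · obtain ⟨hx2, hx3⟩ := h23 x rfl
    have hL : PySem.List.pyGetD [x] (-1) 0 = x := rfl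
    have hN : PySem.List.pyGet? [x] (-2) = none := rfl
    have hm1 : (match (none : Option Int) with
        | some y => if y = 2 then (5:Int) else 4 | none => 0) = 0 := rfl
    rw [hL, hN, hm1, if_pos (show ([x] : List Int) ≠ [] from List.cons_ne_nil x []),
        if_neg (show ¬((1:Nat) < ([x] : List Int).length) by simp), pvTable]
    split_ifs <;> omega
  · have hlen2 : 2 ≤ (x :: y :: c'' : List Int).length := by
      simp only [List.length_cons]; omega
    have hM : PySem.List.pyGet? (x :: y :: c'') (-2)
        = some (PySem.List.pyGetD (x :: y :: c'') (-2) 0) := by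
      rw [PySem.List.pyGet?_neg_ofNat _ 2 (by norm_num) hlen2,
          PySem.List.pyGetD_neg_ofNat _ 2 0 (by norm_num) hlen2,
          List.getElem?_eq_getElem (by omega)]
    have hms5 : ∀ M : Int, (match some M with
        | some y => if y = 2 then (5:Int) else 4 | none => 0) = if M = 2 then 5 else 4 :=
      fun _ => rfl
    have hms3 : ∀ M : Int, (match some M with
        | some y => if y = 2 then (3:Int) else 2 | none => 0) = if M = 2 then 3 else 2 :=
      fun _ => rfl
    rw [hM, hms5, hms3, pvTable]
    split_ifs <;> omega

theorem pvHandTypeA_eq (s : List Char) (hs : pvShape s = false) : pvHandTypeA s = pvTypeSpec s := by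
  cases hcs : s with
  | nil => decide
  | cons a t =>
  subst hcs
  obtain ⟨a', t', hst⟩ : ∃ a' t', PySem.List.sorted (a :: t) (fun c => c) false = a' :: t' := by
    cases h : PySem.List.sorted (a :: t) (fun c => c) false with
    | nil => exact absurd ((PySem.List.sorted_eq_nil_iff _ _ _).mp h) (by simp)
    | cons x y => exact ⟨x, y, rfl⟩
  have hpw : (a' :: t').Pairwise (· ≤ ·) := by
    have h := PySem.List.sorted_pairwise (a :: t) (fun c => c)
    rw [hst] at h; exact h
  have hrle : pvRle a' 1 t' = (pvDedup (a' :: t')).map (fun c => ((a' :: t').count c : Int)) := by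
    rw [pvRleEq t' a' 1 hpw]
    simp only [pvDedup, List.map_cons]
    congr 1
    · rw [List.count_cons_self]; push_cast; ring
    · apply List.map_congr_left
      intro c hc
      have hcne : c ≠ a' := by simpa using (List.mem_filter.mp hc).2
      simp [Ne.symm hcne]
  have hps : (a' :: t').Perm (a :: t) := hst ▸ PySem.List.sorted_perm (a :: t) (fun c => c) false
  have hperm : ((pvDedup (a' :: t')).map (fun c => ((a' :: t').count c : Int))).Perm
      ((PySem.List.dedup (a :: t)).map (fun c => ((a :: t).count c : Int))) := by
    have hfun : (fun c => (((a' :: t').count c : Int))) = (fun c => (((a :: t).count c : Int))) :=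
      funext fun c => by rw [hps.count_eq]
    rw [hfun]
    apply List.Perm.map
    rw [List.perm_ext_iff_of_nodup (pv_nodup_pvDedup _) (PySem.List.nodup_dedup _)]
    intro c
    rw [pv_mem_pvDedup, PySem.List.mem_dedup, hps.mem_iff]
  have hsorted : PySem.List.sorted (pvRle a' 1 t') (fun x => x) false = pvCountsSpec (a :: t) := by
    rw [hrle]
    exact PySem.List.sorted_eq_sorted_of_perm _ _ _ (fun x y h => h) hperm
  have hCne : pvCountsSpec (a :: t) ≠ [] := by
    rw [← hsorted, Ne, PySem.List.sorted_eq_nil_iff, hrle]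
    simp [pvDedup]
  have h23 : ∀ x : Int, pvCountsSpec (a :: t) = [x] → x ≠ 2 ∧ x ≠ 3 := by
    intro x hx
    have hp : ((PySem.List.dedup (a :: t)).map (fun c => (((a :: t).count c : Int)))).Perm [x] := by
      have hq := PySem.List.sorted_perm ((PySem.List.dedup (a :: t)).map fun c => (((a :: t).count c : Int))) (fun x => x) false
      rw [pvCountsSpec] at hx
      rw [hx] at hq
      exact hq.symm
    have hl : (PySem.List.dedup (a :: t)).map (fun c => (((a :: t).count c : Int))) = [x] :=
      List.perm_singleton.mp hp
    obtain ⟨d, hdd, hxc⟩ : ∃ d, PySem.List.dedup (a :: t) = [d] ∧ x = ((a :: t).count d : Int) := by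
      rcases hdm : PySem.List.dedup (a :: t) with _ | ⟨d, rest⟩
      · rw [hdm] at hl; simp at hl
      · rw [hdm] at hl
        rcases rest with _ | _
        · simp at hl; exact ⟨d, rfl, hl.symm⟩
        · simp at hl
    have hall : ∀ e ∈ (a :: t), e = d := by
      intro e he
      have hm : e ∈ PySem.List.dedup (a :: t) := (PySem.List.mem_dedup _ _).mpr he
      rw [hdd] at hm; simpa using hm
    have hrep : (a :: t) = List.replicate (a :: t).length d := List.eq_replicate_of_mem hall
    have hcnt : (a :: t).count d = (a :: t).length := by
      conv_lhs => rw [hrep]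
      simp
    have hxlen : x = (((a :: t).length : Nat) : Int) := by
      rw [hxc]; exact_mod_cast congrArg (fun n : Nat => (n : Int)) hcnt
    constructor
    · intro hx2
      have hlen2 : (a :: t).length = 2 := by omega
      have hrep2 : (a :: t) = [d, d] := by
        have h' := hrep; rw [hlen2] at h'; simpa [List.replicate] using h'
      rw [hrep2] at hs; simp [pvShape] at hs
    · intro hx3
      have hlen3 : (a :: t).length = 3 := by omega
      have hrep3 : (a :: t) = [d, d, d] := by
        have h' := hrep; rw [hlen3] at h'; simpa [List.replicate] using h'
      rw [hrep3] at hs; simp [pvShape] at hs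
  unfold pvHandTypeA
  simp only []
  rw [pvScanEq (a :: t) a' t' hst, hsorted]
  exact pvClassifyEq (a :: t) hCne h23

theorem pvHandTypeB_eq (s : List Char) : pvHandTypeB s = pvTypeSpec s := by
  unfold pvHandTypeB pvTypeSpec pvCountsSpec
  rw [PySem.Dict.foldl_insert_getD_add_one_eq_counter]
  simp [PySem.Dict.values, PySem.Dict.items_counter, List.map_map, Function.comp_def,
    PySem.List.dedup_eq_ofList]

theorem pvVals_some : ∀ c ∈ pvCardList, (PySem.Dict.get? pvValsD c).isSome = true := by
  intro c hc; fin_cases hc <;> rfl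

theorem pvVals_inj : ∀ c₁ ∈ pvCardList, ∀ c₂ ∈ pvCardList,
    PySem.Dict.get? pvValsD c₁ = PySem.Dict.get? pvValsD c₂ → c₁ = c₂ := by
  intro c₁ h₁ c₂ h₂; fin_cases h₁ <;> fin_cases h₂ <;> simp_all <;> decide

theorem pvSafeStep (k : Nat) (s1 s2 : List Char) (heq : s1.getD k ' ' = s2.getD k ' ')
    (h : pvSafeFrom k s1 s2) : pvSafeFrom (k+1) s1 s2 := by
  rcases h with ⟨i, hi, hki, hall, hne⟩ | ⟨hlen, hall⟩
  · by_cases hik : i = k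
    · exact absurd (hik ▸ heq) hne
    · exact Or.inl ⟨i, hi, by omega, fun j hj hkj => hall j hj (by omega), hne⟩
  · exact Or.inr ⟨hlen, fun i hi hki => hall i hi (by omega)⟩

theorem pvTieBase (k : Nat) (s1 s2 : List Char) (h : s1.length ≤ k) :
    pvTieA s1 s2 (PySem.List.pyRange (k : Int) (PySem.List.len s1) 1)
      = pvTieB (s1.drop k) (s2.drop k) := by
  have hr : PySem.List.pyRange (k : Int) (PySem.List.len s1) 1 = [] := by
    simp [PySem.List.pyRange, PySem.List.len]; omega
  rw [hr, List.drop_eq_nil_of_le h]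
  cases s2.drop k <;> simp [pvTieA, pvTieB]

theorem pvTieEq (n : Nat) : ∀ (k : Nat) (s1 s2 : List Char), s1.length ≤ k + n → pvSafeFrom k s1 s2 →
    pvTieA s1 s2 (PySem.List.pyRange (k : Int) (PySem.List.len s1) 1)
      = pvTieB (s1.drop k) (s2.drop k) := by
  induction n with
  | zero => intro k s1 s2 hlen _; exact pvTieBase k s1 s2 (by omega)
  | succ n ih =>
    intro k s1 s2 hlen hsafe
    by_cases hk : k < s1.length
    · have hk2 : k < s2.length := by
        rcases hsafe with ⟨i, hi, hki, _, _⟩ | ⟨hl, _⟩ <;> omega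
      obtain ⟨hc1, hc2⟩ : pvCardOK (s1.getD k ' ') = true ∧ pvCardOK (s2.getD k ' ') = true := by
        rcases hsafe with ⟨i, hi, hki, hall, _⟩ | ⟨hl, hall⟩
        · exact hall k hki le_rfl
        · exact hall k hk le_rfl
      have hm1 : s1.getD k ' ' ∈ pvCardList := by simpa [pvCardOK] using hc1
      have hm2 : s2.getD k ' ' ∈ pvCardList := by simpa [pvCardOK] using hc2
      obtain ⟨v1, hv1⟩ := Option.isSome_iff_exists.mp (pvVals_some _ hm1)
      obtain ⟨v2, hv2⟩ := Option.isSome_iff_exists.mp (pvVals_some _ hm2)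
      have hrange : PySem.List.pyRange (k : Int) (PySem.List.len s1) 1
          = (k : Int) :: PySem.List.pyRange ((k : Int) + 1) (PySem.List.len s1) 1 :=
        PySem.List.pyRange_one_cons (by simp [PySem.List.len_eq]; omega)
      have hgd1 : s1.getD k ' ' = s1[k] := List.getD_eq_getElem s1 ' ' hk
      have hgd2 : s2.getD k ' ' = s2[k] := List.getD_eq_getElem s2 ' ' hk2
      have hget1 : PySem.List.pyGet? s1 (k : Int) = some (s1.getD k ' ') := by
        rw [PySem.List.pyGet?_natCast, List.getElem?_eq_getElem hk, hgd1]
      have hget2 : PySem.List.pyGet? s2 (k : Int) = some (s2.getD k ' ') := by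
        rw [PySem.List.pyGet?_natCast, List.getElem?_eq_getElem hk2, hgd2]
      rw [hrange, List.drop_eq_getElem_cons hk, List.drop_eq_getElem_cons hk2, ← hgd1, ← hgd2]
      simp only [pvTieA, pvTieB, hget1, hget2, hv1, hv2]
      have hcast : ((k : Int) + 1) = (((k + 1 : Nat)) : Int) := by push_cast; ring
      rcases lt_trichotomy v1 v2 with h | h | h
      · simp [h, ne_of_lt h]
      · have hcc : s1.getD k ' ' = s2.getD k ' ' :=
          pvVals_inj _ hm1 _ hm2 (hv1.trans (h ▸ hv2).symm)
        subst h
        rw [if_neg (lt_irrefl _), if_neg (lt_irrefl _), if_neg (fun hh : v1 ≠ v1 => hh rfl), hcast]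
        exact ih (k + 1) s1 s2 (by omega) (pvSafeStep k s1 s2 hcc hsafe)
      · simp [not_lt_of_gt h, ne_of_gt h, h]
    · exact pvTieBase k s1 s2 (by omega)

-- ===== VERDICT (by name: the statement is the Claim_ definition above) =====
theorem compare_py_spec : Claim_equal_compare_py := by
  unfold Claim_equal_compare_py
  intro item1 item2 _ hpre
  obtain ⟨hs1, hs2, htie⟩ := hpre
  unfold Spec_compare_py compare_py compare_py_alt
  simp only []
  rw [pvHandTypeA_eq _ hs1, pvHandTypeA_eq _ hs2, pvHandTypeB_eq, pvHandTypeB_eq]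
  rcases lt_trichotomy (pvTypeSpec item1.1.toList) (pvTypeSpec item2.1.toList) with h | h | h
  · rw [if_pos h, if_pos (ne_of_lt h), if_pos h]
  · rw [if_neg (by omega), if_neg (by omega), if_neg (by simp [h])]
    have hsafe := htie h
    have hmain := pvTieEq item1.1.toList.length 0 item1.1.toList item2.1.toList (by omega) hsafe
    simpa using hmain
  · rw [if_neg (not_lt_of_gt h), if_pos h, if_pos (ne_of_gt h), if_neg (not_lt_of_gt h)]
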